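-- pv_equiv track=rewrite | github.com/Vikassuthar78/evolvex-grant | backend/agents/discovery.py | _categorize_grant
-- ===== SOURCE A (Python) =====
-- def _categorize_grant(agency: str, title: str) -> str:
--     """Categorize grant by agency and title keywords."""
--     agency_lower = agency.lower()
--     title_lower = title.lower()
--
--     if "nsf" in agency_lower or "science" in agency_lower:
--         return "Research & Development"
--     elif "energy" in agency_lower or "doe" in agency_lower:
--         return "Energy & Climate"
--     elif "health" in agency_lower or "nih" in agency_lower:
--         return "Health & Biotech"
--     elif "agriculture" in agency_lower or "usda" in agency_lower:
--         return "Agriculture"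
--     elif "commerce" in agency_lower or "eda" in agency_lower:
--         return "Economic Development"
--     elif any(w in title_lower for w in ["technology", "innovation", "ai", "cyber"]):
--         return "Technology & Innovation"
--     else:
--         return "General"
-- ===== SOURCE B (Python) =====
-- # Inverted-index rewrite: instead of scanning categories in priority order and
-- # returning at the first match, B collects ALL keyword hits via a keyword->rank
-- # index, then selects the best (lowest) rank with min and looks up its category.
-- _CATEGORIES = [
--     "Research & Development",
--     "Energy & Climate",
--     "Health & Biotech",
--     "Agriculture",
--     "Economic Development",
--     "Technology & Innovation",
-- ]
--
-- # rank 5 keywords are matched against the title; ranks 0-4 against the agency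
-- _KEYWORD_RANK = {
--     "nsf": 0, "science": 0,
--     "energy": 1, "doe": 1,
--     "health": 2, "nih": 2,
--     "agriculture": 3, "usda": 3,
--     "commerce": 4, "eda": 4,
--     "technology": 5, "innovation": 5, "ai": 5, "cyber": 5,
-- }
--
--
-- def _categorize_grant(agency: str, title: str) -> str:
--     agency_lower = agency.lower()
--     title_lower = title.lower()
--     hits = [rank for kw, rank in _KEYWORD_RANK.items()
--             if kw in (title_lower if rank == 5 else agency_lower)]
--     return _CATEGORIES[min(hits)] if hits else "General"
-- ===== Notes on version B (the rewrite author's own statement) =====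
-- stated objective: alternative
-- what changed: Replaced the ordered if/elif first-match chain with an inverted keyword->rank index: B collects every matching keyword's rank in one pass, takes min over all hits, and indexes a category table (returning 'General' on no hits).
import Mathlib
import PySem

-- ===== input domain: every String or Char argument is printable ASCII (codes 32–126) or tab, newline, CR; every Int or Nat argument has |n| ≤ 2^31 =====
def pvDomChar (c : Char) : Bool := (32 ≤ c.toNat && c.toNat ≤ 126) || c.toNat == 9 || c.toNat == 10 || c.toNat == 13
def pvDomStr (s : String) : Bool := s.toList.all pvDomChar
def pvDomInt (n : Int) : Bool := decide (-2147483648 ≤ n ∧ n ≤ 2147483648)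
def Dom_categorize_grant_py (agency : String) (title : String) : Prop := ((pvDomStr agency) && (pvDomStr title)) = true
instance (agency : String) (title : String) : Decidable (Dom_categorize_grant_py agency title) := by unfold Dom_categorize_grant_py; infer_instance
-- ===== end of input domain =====

-- B replaces A's ordered first-match if/elif chain with an inverted keyword->rank index:
-- collect all matching ranks, take min, index a category table (alternative; same cost).

-- ===== PORT A =====
def categorize_grant_py (agency : String) (title : String) : String :=
  let agency_lower := PySem.Str.lower agency
  let title_lower := PySem.Str.lower title
  if PySem.Str.isIn "nsf" agency_lower || PySem.Str.isIn "science" agency_lower then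
    "Research & Development"
  else if PySem.Str.isIn "energy" agency_lower || PySem.Str.isIn "doe" agency_lower then
    "Energy & Climate"
  else if PySem.Str.isIn "health" agency_lower || PySem.Str.isIn "nih" agency_lower then
    "Health & Biotech"
  else if PySem.Str.isIn "agriculture" agency_lower || PySem.Str.isIn "usda" agency_lower then
    "Agriculture"
  else if PySem.Str.isIn "commerce" agency_lower || PySem.Str.isIn "eda" agency_lower then
    "Economic Development"
  else if (["technology", "innovation", "ai", "cyber"].any (fun w => PySem.Str.isIn w title_lower)) then
    "Technology & Innovation"
  else
    "General"

-- ===== PORT B =====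
-- Source B's module-level category table _CATEGORIES
def pvCategories : List String :=
  [ "Research & Development", "Energy & Climate", "Health & Biotech",
    "Agriculture", "Economic Development", "Technology & Innovation" ]

-- Source B's module-level inverted index _KEYWORD_RANK (dict in insertion order)
def pvKeywordRank : List (String × Int) :=
  [ ("nsf", 0), ("science", 0), ("energy", 1), ("doe", 1), ("health", 2), ("nih", 2),
    ("agriculture", 3), ("usda", 3), ("commerce", 4), ("eda", 4),
    ("technology", 5), ("innovation", 5), ("ai", 5), ("cyber", 5) ]

def categorize_grant_py_alt (agency : String) (title : String) : String :=
  let agency_lower := PySem.Str.lower agency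
  let title_lower := PySem.Str.lower title
  -- the list comprehension over _KEYWORD_RANK.items()
  let hits := (pvKeywordRank.filter
      (fun kr => PySem.Str.isIn kr.1 (if kr.2 == 5 then title_lower else agency_lower))).map
      (fun kr => kr.2)
  -- _CATEGORIES[min(hits)] if hits else "General"
  match PySem.List.min? hits (fun x => x) with
  | some m => PySem.List.pyGetD pvCategories m ""
  | none => "General"

-- ===== PRECONDITION & SPEC =====
def Spec_categorize_grant_py (agency : String) (title : String) (out : String) : Prop := out = categorize_grant_py_alt agency title
instance (agency : String) (title : String) (out : String) : Decidable (Spec_categorize_grant_py agency title out) := by unfold Spec_categorize_grant_py; infer_instance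

-- ===== CLAIM (what is proved, stated in full; the proofs are below) =====
def Claim_equal_categorize_grant_py : Prop := ∀ (agency : String) (title : String), Dom_categorize_grant_py agency title → Spec_categorize_grant_py agency title (categorize_grant_py agency title)

-- ===== LEMMAS AND PROOFS =====
-- min of a list whose head is a lower bound of the tail is the head
lemma pvMinHead (a : Int) (t : List Int) (h : ∀ y ∈ t, a ≤ y) :
    PySem.List.min? (a :: t) (fun x => x) = some a := by
  rw [PySem.List.min?_id_cons]
  have h1 := (PySem.List.foldl_min_le t a).1
  rcases PySem.List.foldl_min_mem t a with h2 | h2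
  · rw [h2]
  · have h3 := h _ h2
    rw [le_antisymm h1 h3]

-- ===== VERDICT (by name: the statement is the Claim_ definition above) =====
theorem categorize_grant_py_spec : Claim_equal_categorize_grant_py := by
  intro agency title _
  unfold Spec_categorize_grant_py categorize_grant_py categorize_grant_py_alt
  simp only [pvKeywordRank]
  set al := PySem.Str.lower agency with hal
  set tl := PySem.Str.lower title with htl
  cases hb0 : PySem.Str.isIn "nsf" al with
  | false =>
    cases hb1 : PySem.Str.isIn "science" al with
    | false =>
      cases hb2 : PySem.Str.isIn "energy" al with
      | false =>
        cases hb3 : PySem.Str.isIn "doe" al with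
        | false =>
          cases hb4 : PySem.Str.isIn "health" al with
          | false =>
            cases hb5 : PySem.Str.isIn "nih" al with
            | false =>
              cases hb6 : PySem.Str.isIn "agriculture" al with
              | false =>
                cases hb7 : PySem.Str.isIn "usda" al with
                | false =>
                  cases hb8 : PySem.Str.isIn "commerce" al with
                  | false =>
                    cases hb9 : PySem.Str.isIn "eda" al with
                    | false =>
                      cases hb10 : PySem.Str.isIn "technology" tl with
                      | false =>
                        cases hb11 : PySem.Str.isIn "innovation" tl with
                        | false =>
                          cases hb12 : PySem.Str.isIn "ai" tl with
                          | false =>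
                            cases hb13 : PySem.Str.isIn "cyber" tl with
                            | false =>
                              -- no keyword matched: hits = [], A falls through to "General"
                              rw [List.filter_cons_of_neg (p := _) (by simpa using hb0), List.filter_cons_of_neg (p := _) (by simpa using hb1), List.filter_cons_of_neg (p := _) (by simpa using hb2), List.filter_cons_of_neg (p := _) (by simpa using hb3), List.filter_cons_of_neg (p := _) (by simpa using hb4), List.filter_cons_of_neg (p := _) (by simpa using hb5), List.filter_cons_of_neg (p := _) (by simpa using hb6), List.filter_cons_of_neg (p := _) (by simpa using hb7), List.filter_cons_of_neg (p := _) (by simpa using hb8), List.filter_cons_of_neg (p := _) (by simpa using hb9), List.filter_cons_of_neg (p := _) (by simpa using hb10), List.filter_cons_of_neg (p := _) (by simpa using hb11), List.filter_cons_of_neg (p := _) (by simpa using hb12), List.filter_cons_of_neg (p := _) (by simpa using hb13)]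
                              simp only [hb10, hb11, hb12, hb13, Bool.or_false, List.any_cons, List.any_nil, List.filter_nil, List.map_nil]
                              decide
                            | true =>
                              rw [List.filter_cons_of_neg (p := _) (by simpa using hb0), List.filter_cons_of_neg (p := _) (by simpa using hb1), List.filter_cons_of_neg (p := _) (by simpa using hb2), List.filter_cons_of_neg (p := _) (by simpa using hb3), List.filter_cons_of_neg (p := _) (by simpa using hb4), List.filter_cons_of_neg (p := _) (by simpa using hb5), List.filter_cons_of_neg (p := _) (by simpa using hb6), List.filter_cons_of_neg (p := _) (by simpa using hb7), List.filter_cons_of_neg (p := _) (by simpa using hb8), List.filter_cons_of_neg (p := _) (by simpa using hb9), List.filter_cons_of_neg (p := _) (by simpa using hb10), List.filter_cons_of_neg (p := _) (by simpa using hb11), List.filter_cons_of_neg (p := _) (by simpa using hb12), List.filter_cons_of_pos (p := _) (by simpa using hb13)]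
                              rw [List.map_cons, pvMinHead 5 _ ?_]
                              · simp only [hb10, hb11, hb12, hb13, Bool.or_true, Bool.or_false, List.any_cons, List.any_nil, reduceIte]
                                decide
                              · intro y hy
                                simp at hy
                          | true =>
                            rw [List.filter_cons_of_neg (p := _) (by simpa using hb0), List.filter_cons_of_neg (p := _) (by simpa using hb1), List.filter_cons_of_neg (p := _) (by simpa using hb2), List.filter_cons_of_neg (p := _) (by simpa using hb3), List.filter_cons_of_neg (p := _) (by simpa using hb4), List.filter_cons_of_neg (p := _) (by simpa using hb5), List.filter_cons_of_neg (p := _) (by simpa using hb6), List.filter_cons_of_neg (p := _) (by simpa using hb7), List.filter_cons_of_neg (p := _) (by simpa using hb8), List.filter_cons_of_neg (p := _) (by simpa using hb9), List.filter_cons_of_neg (p := _) (by simpa using hb10), List.filter_cons_of_neg (p := _) (by simpa using hb11), List.filter_cons_of_pos (p := _) (by simpa using hb12)]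
                            rw [List.map_cons, pvMinHead 5 _ ?_]
                            · simp only [hb10, hb11, hb12, Bool.true_or, Bool.or_true, Bool.or_false, List.any_cons, List.any_nil, reduceIte]
                              decide
                            · intro y hy
                              obtain ⟨kr, hkr, rfl⟩ := List.mem_map.1 hy
                              have hmem := (List.mem_filter.1 hkr).1
                              have hall : ∀ kr ∈ ([("cyber", 5)] : List (String × Int)), (5:Int) ≤ kr.2 := by decide
                              exact hall _ hmem
                        | true =>
                          rw [List.filter_cons_of_neg (p := _) (by simpa using hb0), List.filter_cons_of_neg (p := _) (by simpa using hb1), List.filter_cons_of_neg (p := _) (by simpa using hb2), List.filter_cons_of_neg (p := _) (by simpa using hb3), List.filter_cons_of_neg (p := _) (by simpa using hb4), List.filter_cons_of_neg (p := _) (by simpa using hb5), List.filter_cons_of_neg (p := _) (by simpa using hb6), List.filter_cons_of_neg (p := _) (by simpa using hb7), List.filter_cons_of_neg (p := _) (by simpa using hb8), List.filter_cons_of_neg (p := _) (by simpa using hb9), List.filter_cons_of_neg (p := _) (by simpa using hb10), List.filter_cons_of_pos (p := _) (by simpa using hb11)]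
                          rw [List.map_cons, pvMinHead 5 _ ?_]
                          · simp only [hb10, hb11, Bool.true_or, Bool.or_true, Bool.or_false, List.any_cons, List.any_nil, reduceIte]
                            decide
                          · intro y hy
                            obtain ⟨kr, hkr, rfl⟩ := List.mem_map.1 hy
                            have hmem := (List.mem_filter.1 hkr).1
                            have hall : ∀ kr ∈ ([("ai", 5), ("cyber", 5)] : List (String × Int)), (5:Int) ≤ kr.2 := by decide
                            exact hall _ hmem
                      | true =>
                        rw [List.filter_cons_of_neg (p := _) (by simpa using hb0), List.filter_cons_of_neg (p := _) (by simpa using hb1), List.filter_cons_of_neg (p := _) (by simpa using hb2), List.filter_cons_of_neg (p := _) (by simpa using hb3), List.filter_cons_of_neg (p := _) (by simpa using hb4), List.filter_cons_of_neg (p := _) (by simpa using hb5), List.filter_cons_of_neg (p := _) (by simpa using hb6), List.filter_cons_of_neg (p := _) (by simpa using hb7), List.filter_cons_of_neg (p := _) (by simpa using hb8), List.filter_cons_of_neg (p := _) (by simpa using hb9), List.filter_cons_of_pos (p := _) (by simpa using hb10)]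
                        rw [List.map_cons, pvMinHead 5 _ ?_]
                        · simp only [hb10, Bool.true_or, Bool.or_false, List.any_cons, List.any_nil, reduceIte]
                          decide
                        · intro y hy
                          obtain ⟨kr, hkr, rfl⟩ := List.mem_map.1 hy
                          have hmem := (List.mem_filter.1 hkr).1
                          have hall : ∀ kr ∈ ([("innovation", 5), ("ai", 5), ("cyber", 5)] : List (String × Int)), (5:Int) ≤ kr.2 := by decide
                          exact hall _ hmem
                    | true =>
                      rw [List.filter_cons_of_neg (p := _) (by simpa using hb0), List.filter_cons_of_neg (p := _) (by simpa using hb1), List.filter_cons_of_neg (p := _) (by simpa using hb2), List.filter_cons_of_neg (p := _) (by simpa using hb3), List.filter_cons_of_neg (p := _) (by simpa using hb4), List.filter_cons_of_neg (p := _) (by simpa using hb5), List.filter_cons_of_neg (p := _) (by simpa using hb6), List.filter_cons_of_neg (p := _) (by simpa using hb7), List.filter_cons_of_neg (p := _) (by simpa using hb8), List.filter_cons_of_pos (p := _) (by simpa using hb9)]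
                      rw [List.map_cons, pvMinHead 4 _ ?_]
                      · simp only [Bool.or_true, Bool.or_false, List.any_cons, List.any_nil, reduceIte]
                        decide
                      · intro y hy
                        obtain ⟨kr, hkr, rfl⟩ := List.mem_map.1 hy
                        have hmem := (List.mem_filter.1 hkr).1
                        have hall : ∀ kr ∈ ([("technology", 5), ("innovation", 5), ("ai", 5), ("cyber", 5)] : List (String × Int)), (4:Int) ≤ kr.2 := by decide
                        exact hall _ hmem
                  | true =>
                    rw [List.filter_cons_of_neg (p := _) (by simpa using hb0), List.filter_cons_of_neg (p := _) (by simpa using hb1), List.filter_cons_of_neg (p := _) (by simpa using hb2), List.filter_cons_of_neg (p := _) (by simpa using hb3), List.filter_cons_of_neg (p := _) (by simpa using hb4), List.filter_cons_of_neg (p := _) (by simpa using hb5), List.filter_cons_of_neg (p := _) (by simpa using hb6), List.filter_cons_of_neg (p := _) (by simpa using hb7), List.filter_cons_of_pos (p := _) (by simpa using hb8)]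
                    rw [List.map_cons, pvMinHead 4 _ ?_]
                    · simp only [Bool.true_or, Bool.or_false, List.any_cons, List.any_nil, reduceIte]
                      decide
                    · intro y hy
                      obtain ⟨kr, hkr, rfl⟩ := List.mem_map.1 hy
                      have hmem := (List.mem_filter.1 hkr).1
                      have hall : ∀ kr ∈ ([("eda", 4), ("technology", 5), ("innovation", 5), ("ai", 5), ("cyber", 5)] : List (String × Int)), (4:Int) ≤ kr.2 := by decide
                      exact hall _ hmem
                | true =>
                  rw [List.filter_cons_of_neg (p := _) (by simpa using hb0), List.filter_cons_of_neg (p := _) (by simpa using hb1), List.filter_cons_of_neg (p := _) (by simpa using hb2), List.filter_cons_of_neg (p := _) (by simpa using hb3), List.filter_cons_of_neg (p := _) (by simpa using hb4), List.filter_cons_of_neg (p := _) (by simpa using hb5), List.filter_cons_of_neg (p := _) (by simpa using hb6), List.filter_cons_of_pos (p := _) (by simpa using hb7)]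
                  rw [List.map_cons, pvMinHead 3 _ ?_]
                  · simp only [Bool.or_true, Bool.or_false, List.any_cons, List.any_nil, reduceIte]
                    decide
                  · intro y hy
                    obtain ⟨kr, hkr, rfl⟩ := List.mem_map.1 hy
                    have hmem := (List.mem_filter.1 hkr).1
                    have hall : ∀ kr ∈ ([("commerce", 4), ("eda", 4), ("technology", 5), ("innovation", 5), ("ai", 5), ("cyber", 5)] : List (String × Int)), (3:Int) ≤ kr.2 := by decide
                    exact hall _ hmem
              | true =>
                rw [List.filter_cons_of_neg (p := _) (by simpa using hb0), List.filter_cons_of_neg (p := _) (by simpa using hb1), List.filter_cons_of_neg (p := _) (by simpa using hb2), List.filter_cons_of_neg (p := _) (by simpa using hb3), List.filter_cons_of_neg (p := _) (by simpa using hb4), List.filter_cons_of_neg (p := _) (by simpa using hb5), List.filter_cons_of_pos (p := _) (by simpa using hb6)]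
                rw [List.map_cons, pvMinHead 3 _ ?_]
                · simp only [Bool.true_or, Bool.or_false, List.any_cons, List.any_nil, reduceIte]
                  decide
                · intro y hy
                  obtain ⟨kr, hkr, rfl⟩ := List.mem_map.1 hy
                  have hmem := (List.mem_filter.1 hkr).1
                  have hall : ∀ kr ∈ ([("usda", 3), ("commerce", 4), ("eda", 4), ("technology", 5), ("innovation", 5), ("ai", 5), ("cyber", 5)] : List (String × Int)), (3:Int) ≤ kr.2 := by decide
                  exact hall _ hmem
            | true =>
              rw [List.filter_cons_of_neg (p := _) (by simpa using hb0), List.filter_cons_of_neg (p := _) (by simpa using hb1), List.filter_cons_of_neg (p := _) (by simpa using hb2), List.filter_cons_of_neg (p := _) (by simpa using hb3), List.filter_cons_of_neg (p := _) (by simpa using hb4), List.filter_cons_of_pos (p := _) (by simpa using hb5)]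
              rw [List.map_cons, pvMinHead 2 _ ?_]
              · simp only [Bool.or_true, Bool.or_false, List.any_cons, List.any_nil, reduceIte]
                decide
              · intro y hy
                obtain ⟨kr, hkr, rfl⟩ := List.mem_map.1 hy
                have hmem := (List.mem_filter.1 hkr).1
                have hall : ∀ kr ∈ ([("agriculture", 3), ("usda", 3), ("commerce", 4), ("eda", 4), ("technology", 5), ("innovation", 5), ("ai", 5), ("cyber", 5)] : List (String × Int)), (2:Int) ≤ kr.2 := by decide
                exact hall _ hmem
          | true =>
            rw [List.filter_cons_of_neg (p := _) (by simpa using hb0), List.filter_cons_of_neg (p := _) (by simpa using hb1), List.filter_cons_of_neg (p := _) (by simpa using hb2), List.filter_cons_of_neg (p := _) (by simpa using hb3), List.filter_cons_of_pos (p := _) (by simpa using hb4)]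
            rw [List.map_cons, pvMinHead 2 _ ?_]
            · simp only [Bool.true_or, Bool.or_false, List.any_cons, List.any_nil, reduceIte]
              decide
            · intro y hy
              obtain ⟨kr, hkr, rfl⟩ := List.mem_map.1 hy
              have hmem := (List.mem_filter.1 hkr).1
              have hall : ∀ kr ∈ ([("nih", 2), ("agriculture", 3), ("usda", 3), ("commerce", 4), ("eda", 4), ("technology", 5), ("innovation", 5), ("ai", 5), ("cyber", 5)] : List (String × Int)), (2:Int) ≤ kr.2 := by decide
              exact hall _ hmem
        | true =>
          rw [List.filter_cons_of_neg (p := _) (by simpa using hb0), List.filter_cons_of_neg (p := _) (by simpa using hb1), List.filter_cons_of_neg (p := _) (by simpa using hb2), List.filter_cons_of_pos (p := _) (by simpa using hb3)]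
          rw [List.map_cons, pvMinHead 1 _ ?_]
          · simp only [Bool.or_true, Bool.or_false, List.any_cons, List.any_nil, reduceIte]
            decide
          · intro y hy
            obtain ⟨kr, hkr, rfl⟩ := List.mem_map.1 hy
            have hmem := (List.mem_filter.1 hkr).1
            have hall : ∀ kr ∈ ([("health", 2), ("nih", 2), ("agriculture", 3), ("usda", 3), ("commerce", 4), ("eda", 4), ("technology", 5), ("innovation", 5), ("ai", 5), ("cyber", 5)] : List (String × Int)), (1:Int) ≤ kr.2 := by decide
            exact hall _ hmem
      | true =>
        rw [List.filter_cons_of_neg (p := _) (by simpa using hb0), List.filter_cons_of_neg (p := _) (by simpa using hb1), List.filter_cons_of_pos (p := _) (by simpa using hb2)]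
        rw [List.map_cons, pvMinHead 1 _ ?_]
        · simp only [Bool.true_or, Bool.or_false, List.any_cons, List.any_nil, reduceIte]
          decide
        · intro y hy
          obtain ⟨kr, hkr, rfl⟩ := List.mem_map.1 hy
          have hmem := (List.mem_filter.1 hkr).1
          have hall : ∀ kr ∈ ([("doe", 1), ("health", 2), ("nih", 2), ("agriculture", 3), ("usda", 3), ("commerce", 4), ("eda", 4), ("technology", 5), ("innovation", 5), ("ai", 5), ("cyber", 5)] : List (String × Int)), (1:Int) ≤ kr.2 := by decide
          exact hall _ hmem
    | true =>
      rw [List.filter_cons_of_neg (p := _) (by simpa using hb0), List.filter_cons_of_pos (p := _) (by simpa using hb1)]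
      rw [List.map_cons, pvMinHead 0 _ ?_]
      · simp only [Bool.or_true, Bool.or_false, List.any_cons, List.any_nil, reduceIte]
        decide
      · intro y hy
        obtain ⟨kr, hkr, rfl⟩ := List.mem_map.1 hy
        have hmem := (List.mem_filter.1 hkr).1
        have hall : ∀ kr ∈ ([("energy", 1), ("doe", 1), ("health", 2), ("nih", 2), ("agriculture", 3), ("usda", 3), ("commerce", 4), ("eda", 4), ("technology", 5), ("innovation", 5), ("ai", 5), ("cyber", 5)] : List (String × Int)), (0:Int) ≤ kr.2 := by decide
        exact hall _ hmem
  | true =>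
    rw [List.filter_cons_of_pos (p := _) (by simpa using hb0)]
    rw [List.map_cons, pvMinHead 0 _ ?_]
    · simp only [Bool.true_or, Bool.or_false, List.any_cons, List.any_nil, reduceIte]
      decide
    · intro y hy
      obtain ⟨kr, hkr, rfl⟩ := List.mem_map.1 hy
      have hmem := (List.mem_filter.1 hkr).1
      have hall : ∀ kr ∈ ([("science", 0), ("energy", 1), ("doe", 1), ("health", 2), ("nih", 2), ("agriculture", 3), ("usda", 3), ("commerce", 4), ("eda", 4), ("technology", 5), ("innovation", 5), ("ai", 5), ("cyber", 5)] : List (String × Int)), (0:Int) ≤ kr.2 := by decide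
      exact hall _ hmem
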